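-- pv_equiv track=rewrite | github.com/pjunod/jerbs | shared/scripts/export_html.py | _group_by_source
-- ===== SOURCE A (Python) =====
-- SOURCE_ORDER = ["Direct Outreach", "Job Alert Listings", "LinkedIn DMs"]
--
-- def _group_by_source(items):
--     """Group results by source in SOURCE_ORDER, returning [(source, items)]."""
--     by_source = {}
--     for item in items:
--         src = item.get("source", "Other")
--         by_source.setdefault(src, []).append(item)
--     ordered = []
--     for src in SOURCE_ORDER:
--         if src in by_source:
--             ordered.append((src, by_source.pop(src)))
--     for src, group in by_source.items():
--         ordered.append((src, group))
--     return ordered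
-- ===== SOURCE B (Python) =====
-- SOURCE_ORDER = ["Direct Outreach", "Job Alert Listings", "LinkedIn DMs"]
--
-- def _group_by_source(items):
--     """Group results by source in SOURCE_ORDER, returning [(source, items)]."""
--     by_source = {}
--     for item in items:
--         by_source.setdefault(item.get("source", "Other"), []).append(item)
--     rank = {s: i for i, s in enumerate(SOURCE_ORDER)}
--     return sorted(by_source.items(), key=lambda kv: rank.get(kv[0], len(SOURCE_ORDER)))
-- ===== Notes on version B (the rewrite author's own statement) =====
-- stated objective: idiomatic
-- what changed: The two-phase emit (scan SOURCE_ORDER popping known sources, then append the leftover dict entries) is replaced by one stable sort of the grouped items under a rank table, with a single shared sentinel rank for unknown sources so stability keeps them in first-appearance order.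
import Mathlib
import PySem

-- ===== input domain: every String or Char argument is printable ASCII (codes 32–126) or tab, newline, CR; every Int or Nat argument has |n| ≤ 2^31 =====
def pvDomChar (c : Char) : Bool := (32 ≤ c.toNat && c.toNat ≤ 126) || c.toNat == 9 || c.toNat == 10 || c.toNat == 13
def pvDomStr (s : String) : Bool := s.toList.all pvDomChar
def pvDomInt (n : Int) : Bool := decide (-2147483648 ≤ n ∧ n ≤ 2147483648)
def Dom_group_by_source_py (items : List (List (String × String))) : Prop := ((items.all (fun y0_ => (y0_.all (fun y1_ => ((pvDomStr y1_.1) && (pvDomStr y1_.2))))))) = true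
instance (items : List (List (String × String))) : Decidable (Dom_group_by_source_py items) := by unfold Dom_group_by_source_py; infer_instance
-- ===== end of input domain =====

-- B replaces A's two-phase emit (scan SOURCE_ORDER popping known sources, then append leftovers)
-- by one stable sort of the grouped items under a rank table; return values proved equal below.

-- module constant SOURCE_ORDER (shared by Source A and Source B)
def pvSourceOrder : List String := ["Direct Outreach", "Job Alert Listings", "LinkedIn DMs"]

-- item.get("source", "Other")
def pvSrcOf (item : List (String × String)) : String :=
  (PySem.Dict.mk item).getD "source" "Other"

-- ===== PORT A =====
def group_by_source_py (items : List (List (String × String))) : List (String × (List (List (String × String)))) :=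
  let bySource := items.foldl
    (fun d item => d.modify (pvSrcOf item) [] (fun g => g ++ [item])) PySem.Dict.empty
  let st := pvSourceOrder.foldl
    (fun (st : List (String × List (List (String × String))) × PySem.Dict String (List (List (String × String)))) src =>
      if st.2.contains src then
        match st.2.pop? src with
        | some (g, d') => (st.1 ++ [(src, g)], d')
        | none => st
      else st)
    ([], bySource)
  st.1 ++ st.2.items

-- ===== PORT B =====
def group_by_source_py_alt (items : List (List (String × String))) : List (String × (List (List (String × String)))) :=
  let bySource := items.foldl
    (fun d item => d.modify (pvSrcOf item) [] (fun g => g ++ [item])) PySem.Dict.empty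
  let rank := (PySem.List.enumerate pvSourceOrder).foldl
    (fun d p => d.insert p.2 p.1) (PySem.Dict.empty : PySem.Dict String Int)
  PySem.List.sorted bySource.items (fun kv => rank.getD kv.1 (PySem.List.len pvSourceOrder)) false

-- ===== PRECONDITION & SPEC =====
def Spec_group_by_source_py (items : List (List (String × String))) (out : List (String × (List (List (String × String))))) : Prop := out = group_by_source_py_alt items
instance (items : List (List (String × String))) (out : List (String × (List (List (String × String))))) : Decidable (Spec_group_by_source_py items out) := by unfold Spec_group_by_source_py; infer_instance

-- ===== CLAIM (what is proved, stated in full; the proofs are below) =====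
def Claim_equal_group_by_source_py : Prop := ∀ (items : List (List (String × String))), Dom_group_by_source_py items → Spec_group_by_source_py items (group_by_source_py items)

-- ===== LEMMAS AND PROOFS =====

-- the rank B's sort key assigns to a source string
def pvRankOf (s : String) : Int :=
  if s = "Direct Outreach" then 0 else if s = "Job Alert Listings" then 1
  else if s = "LinkedIn DMs" then 2 else 3

lemma pvRank_eval (s : String) :
    ((PySem.List.enumerate pvSourceOrder).foldl
      (fun d p => d.insert p.2 p.1) (PySem.Dict.empty : PySem.Dict String Int)).getD s
        (PySem.List.len pvSourceOrder) = pvRankOf s := by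
  have h : ((PySem.List.enumerate pvSourceOrder).foldl
      (fun d p => d.insert p.2 p.1) (PySem.Dict.empty : PySem.Dict String Int))
      = PySem.Dict.mk [("Direct Outreach",(0:Int)),("Job Alert Listings",1),("LinkedIn DMs",2)] := by decide
  have h2 : PySem.List.len pvSourceOrder = 3 := by decide
  rw [h, h2]
  by_cases h0 : s = "Direct Outreach"
  · subst h0; decide
  by_cases h1 : s = "Job Alert Listings"
  · subst h1; decide
  by_cases h3 : s = "LinkedIn DMs"
  · subst h3; decide
  rw [PySem.Dict.getD_eq_get?_getD]
  simp only [PySem.Dict.get?_mk_cons,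
    show (("Direct Outreach":String) == s) = false by simp [Ne.symm h0],
    show (("Job Alert Listings":String) == s) = false by simp [Ne.symm h1],
    show (("LinkedIn DMs":String) == s) = false by simp [Ne.symm h3]]
  simp [pvRankOf, h0, h1, h3, PySem.Dict.get?]

lemma pvRankOf_cases (s : String) :
    pvRankOf s = 0 ∨ pvRankOf s = 1 ∨ pvRankOf s = 2 ∨ pvRankOf s = 3 := by
  unfold pvRankOf; split_ifs <;> simp
lemma insertBy_split {α : Type} (bef : α → α → Bool) (x : α) :
    ∀ l1 l2 : List α, (∀ y ∈ l1, bef x y = false) → (∀ y ∈ l2, bef x y = true) →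
      PySem.List.insertBy bef x (l1 ++ l2) = l1 ++ x :: l2 := by
  intro l1
  induction l1 with
  | nil =>
    intro l2 _ h2
    cases l2 with
    | nil => rfl
    | cons y ys => simp [PySem.List.insertBy, h2 y (by simp)]
  | cons a t ih =>
    intro l2 h1 h2
    simp [PySem.List.insertBy, h1 a (by simp), ih l2 (fun y hy => h1 y (by simp [hy])) h2]

def pvBuck (l : List (String × List (List (String × String)))) :
    List (String × List (List (String × String))) :=
  l.filter (fun kv => pvRankOf kv.1 == 0) ++ l.filter (fun kv => pvRankOf kv.1 == 1) ++
  l.filter (fun kv => pvRankOf kv.1 == 2) ++ l.filter (fun kv => pvRankOf kv.1 == 3)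

lemma mem_filter_rank (l : List (String × List (List (String × String)))) (i : Int)
    (y : String × List (List (String × String))) (hy : y ∈ l.filter (fun kv => pvRankOf kv.1 == i)) :
    pvRankOf y.1 = i := by
  simpa using (List.mem_filter.mp hy).2

lemma insertBy_buck (x : String × List (List (String × String)))
    (p : List (String × List (List (String × String)))) :
    PySem.List.insertBy (fun a b => decide (pvRankOf a.1 < pvRankOf b.1)) x (pvBuck p)
      = pvBuck (p ++ [x]) := by
  have hfilt : ∀ i : Int, (p ++ [x]).filter (fun kv => pvRankOf kv.1 == i)
      = p.filter (fun kv => pvRankOf kv.1 == i) ++ (if pvRankOf x.1 = i then [x] else []) := by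
    intro i
    rw [List.filter_append]
    congr 1
    by_cases h : pvRankOf x.1 = i <;> simp [h]
  rcases pvRankOf_cases x.1 with h | h | h | h
  · have := insertBy_split (fun a b => decide (pvRankOf a.1 < pvRankOf b.1)) x
      (p.filter (fun kv => pvRankOf kv.1 == 0))
      (p.filter (fun kv => pvRankOf kv.1 == 1) ++ p.filter (fun kv => pvRankOf kv.1 == 2)
        ++ p.filter (fun kv => pvRankOf kv.1 == 3))
      (by intro y hy; have := mem_filter_rank p 0 y hy; simp [this, h])
      (by intro y hy
          simp only [List.mem_append] at hy
          rcases hy with (hy | hy) | hy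
          · have := mem_filter_rank p 1 y hy; simp [this, h]
          · have := mem_filter_rank p 2 y hy; simp [this, h]
          · have := mem_filter_rank p 3 y hy; simp [this, h])
    unfold pvBuck
    simp only [hfilt, h]
    simp only [List.append_assoc, List.append_nil] at this ⊢
    simp only [this]
    simp
  · have := insertBy_split (fun a b => decide (pvRankOf a.1 < pvRankOf b.1)) x
      (p.filter (fun kv => pvRankOf kv.1 == 0) ++ p.filter (fun kv => pvRankOf kv.1 == 1))
      (p.filter (fun kv => pvRankOf kv.1 == 2) ++ p.filter (fun kv => pvRankOf kv.1 == 3))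
      (by intro y hy
          simp only [List.mem_append] at hy
          rcases hy with (hy | hy)
          · have := mem_filter_rank p 0 y hy; simp [this, h]
          · have := mem_filter_rank p 1 y hy; simp [this, h])
      (by intro y hy
          simp only [List.mem_append] at hy
          rcases hy with (hy | hy)
          · have := mem_filter_rank p 2 y hy; simp [this, h]
          · have := mem_filter_rank p 3 y hy; simp [this, h])
    unfold pvBuck
    simp only [hfilt, h]
    simp only [List.append_assoc, List.append_nil] at this ⊢
    simp only [this]
    simp
  · have := insertBy_split (fun a b => decide (pvRankOf a.1 < pvRankOf b.1)) x
      (p.filter (fun kv => pvRankOf kv.1 == 0) ++ p.filter (fun kv => pvRankOf kv.1 == 1) ++ p.filter (fun kv => pvRankOf kv.1 == 2))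
      (p.filter (fun kv => pvRankOf kv.1 == 3))
      (by intro y hy
          simp only [List.mem_append] at hy
          rcases hy with ((hy | hy) | hy)
          · have := mem_filter_rank p 0 y hy; simp [this, h]
          · have := mem_filter_rank p 1 y hy; simp [this, h]
          · have := mem_filter_rank p 2 y hy; simp [this, h])
      (by intro y hy
          have := mem_filter_rank p 3 y hy; simp [this, h])
    unfold pvBuck
    simp only [hfilt, h]
    simp only [List.append_assoc, List.append_nil] at this ⊢
    simp only [this]
    simp
  · have := insertBy_split (fun a b => decide (pvRankOf a.1 < pvRankOf b.1)) x
      (p.filter (fun kv => pvRankOf kv.1 == 0) ++ p.filter (fun kv => pvRankOf kv.1 == 1) ++ p.filter (fun kv => pvRankOf kv.1 == 2) ++ p.filter (fun kv => pvRankOf kv.1 == 3))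
      (([] : List (String × List (List (String × String)))))
      (by intro y hy
          simp only [List.mem_append] at hy
          rcases hy with (((hy | hy) | hy) | hy)
          · have := mem_filter_rank p 0 y hy; simp [this, h]
          · have := mem_filter_rank p 1 y hy; simp [this, h]
          · have := mem_filter_rank p 2 y hy; simp [this, h]
          · have := mem_filter_rank p 3 y hy; simp [this, h])
      (by intro y hy
          exact absurd hy (by simp))
    unfold pvBuck
    simp only [hfilt, h]
    simp only [List.append_assoc, List.append_nil] at this ⊢
    simp only [this]
    simp

lemma sorted_eq_buckets (l : List (String × List (List (String × String)))) :
    PySem.List.sorted l (fun kv => pvRankOf kv.1) false = pvBuck l := by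
  rw [PySem.List.sorted_eq_foldl_insertBy]
  have aux : ∀ (l p : List (String × List (List (String × String)))),
      l.foldl (fun acc x => PySem.List.insertBy (fun a b => decide (pvRankOf a.1 < pvRankOf b.1)) x acc) (pvBuck p)
        = pvBuck (p ++ l) := by
    intro l
    induction l with
    | nil => intro p; simp
    | cons x t ih =>
      intro p
      simp only [List.foldl_cons]
      rw [insertBy_buck, ih (p ++ [x])]
      simp
  have := aux l []
  simpa [pvBuck] using this

lemma filter_fst_eq {V : Type} (s : String) :
    ∀ l : List (String × V), (l.map Prod.fst).Nodup →
      l.filter (fun p => p.1 == s) = ((PySem.Dict.mk l).get? s).elim [] (fun v => [(s, v)]) := by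
  intro l
  induction l with
  | nil => intro _; rfl
  | cons a t ih =>
    intro h
    obtain ⟨a1, a2⟩ := a
    simp only [List.map_cons, List.nodup_cons] at h
    rw [List.filter_cons, PySem.Dict.get?_mk_cons]
    by_cases ha : a1 = s
    · subst ha
      have hnot : t.filter (fun p => p.1 == a1) = [] := by
        apply List.filter_eq_nil_iff.mpr
        intro p hp hps
        exact h.1 (by rw [← show p.1 = a1 by simpa using hps]; exact List.mem_map_of_mem hp)
      simp [hnot]
    · simp only [show ((a1, a2).1 == s) = false by simp [ha], Bool.false_eq_true, if_false]
      simpa using ih h.2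

lemma get?_erase_ne {V : Type} (d : PySem.Dict String V) (k k' : String) (h : k' ≠ k) :
    (d.erase k).get? k' = d.get? k' := by
  obtain ⟨l⟩ := d
  show (PySem.Dict.mk (l.filter fun p => !p.1 == k)).get? k' = (PySem.Dict.mk l).get? k'
  induction l with
  | nil => rfl
  | cons a t ih =>
    obtain ⟨a1, a2⟩ := a
    rw [List.filter_cons]
    by_cases ha : a1 = k
    · simp only [show (!(a1, a2).1 == k) = false by simp [ha], Bool.false_eq_true, if_false]
      rw [ih, PySem.Dict.get?_mk_cons,
        if_neg (by simp [show a1 ≠ k' by rw [ha]; exact Ne.symm h])]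
    · simp only [show (!(a1, a2).1 == k) = true by simp [ha], if_true]
      rw [PySem.Dict.get?_mk_cons, PySem.Dict.get?_mk_cons, ih]


lemma rank_beq0 (s : String) : (pvRankOf s == (0:Int)) = (s == "Direct Outreach") := by
  unfold pvRankOf; split_ifs with h1 h2 h3 <;> simp [h1]
lemma rank_beq1 (s : String) : (pvRankOf s == (1:Int)) = (s == "Job Alert Listings") := by
  unfold pvRankOf; split_ifs with h1 h2 h3 <;> simp_all
lemma rank_beq2 (s : String) : (pvRankOf s == (2:Int)) = (s == "LinkedIn DMs") := by
  unfold pvRankOf; split_ifs with h1 h2 h3 <;> simp_all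
lemma rank_beq3 (s : String) :
    (pvRankOf s == (3:Int)) = (!(s == "Direct Outreach") && !(s == "Job Alert Listings") && !(s == "LinkedIn DMs")) := by
  unfold pvRankOf; split_ifs with h1 h2 h3 <;> simp_all


set_option maxRecDepth 4096 in
lemma emit_eq (d : PySem.Dict String (List (List (String × String))))
    (hnd : (d.items.map Prod.fst).Nodup) :
    (let st := pvSourceOrder.foldl
      (fun (st : List (String × List (List (String × String))) × PySem.Dict String (List (List (String × String)))) src =>
        if st.2.contains src then
          match st.2.pop? src with
          | some (g, d') => (st.1 ++ [(src, g)], d')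
          | none => st
        else st)
      ([], d)
     st.1 ++ st.2.items) = pvBuck d.items := by
  have hmk : PySem.Dict.mk d.items = d := rfl
  have hf0 : d.items.filter (fun kv => pvRankOf kv.1 == 0)
      = (d.get? "Direct Outreach").elim [] (fun v => [("Direct Outreach", v)]) := by
    rw [List.filter_congr (fun kv _ => rank_beq0 kv.1), filter_fst_eq _ _ hnd, hmk]
  have hf1 : d.items.filter (fun kv => pvRankOf kv.1 == 1)
      = (d.get? "Job Alert Listings").elim [] (fun v => [("Job Alert Listings", v)]) := by
    rw [List.filter_congr (fun kv _ => rank_beq1 kv.1), filter_fst_eq _ _ hnd, hmk]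
  have hf2 : d.items.filter (fun kv => pvRankOf kv.1 == 2)
      = (d.get? "LinkedIn DMs").elim [] (fun v => [("LinkedIn DMs", v)]) := by
    rw [List.filter_congr (fun kv _ => rank_beq2 kv.1), filter_fst_eq _ _ hnd, hmk]
  simp only [pvSourceOrder, List.foldl_cons, List.foldl_nil]
  rcases hv0 : d.get? "Direct Outreach" with _ | v0 <;>
    rcases hv1 : d.get? "Job Alert Listings" with _ | v1 <;>
      rcases hv2 : d.get? "LinkedIn DMs" with _ | v2
  · -- case (0, 0, 0)
    have e0 : d.get? "Direct Outreach" = none := by exact hv0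
    have e1 : d.get? "Job Alert Listings" = none := by exact hv1
    have e2 : d.get? "LinkedIn DMs" = none := by exact hv2
    have habs0 : ∀ p ∈ d.items, (p.1 == "Direct Outreach") = false := by
      intro p hp
      have hc := (PySem.Dict.get?_eq_none_iff_contains d "Direct Outreach").mp hv0
      simp only [beq_eq_false_iff_ne, ne_eq]
      intro hpe
      rw [← hpe] at hc
      rw [(PySem.Dict.contains_iff_mem_keys d p.1).mpr (PySem.Dict.mem_keys_of_mem_items d hp)] at hc
      exact Bool.true_eq_false.mp hc
    have habs1 : ∀ p ∈ d.items, (p.1 == "Job Alert Listings") = false := by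
      intro p hp
      have hc := (PySem.Dict.get?_eq_none_iff_contains d "Job Alert Listings").mp hv1
      simp only [beq_eq_false_iff_ne, ne_eq]
      intro hpe
      rw [← hpe] at hc
      rw [(PySem.Dict.contains_iff_mem_keys d p.1).mpr (PySem.Dict.mem_keys_of_mem_items d hp)] at hc
      exact Bool.true_eq_false.mp hc
    have habs2 : ∀ p ∈ d.items, (p.1 == "LinkedIn DMs") = false := by
      intro p hp
      have hc := (PySem.Dict.get?_eq_none_iff_contains d "LinkedIn DMs").mp hv2
      simp only [beq_eq_false_iff_ne, ne_eq]
      intro hpe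
      rw [← hpe] at hc
      rw [(PySem.Dict.contains_iff_mem_keys d p.1).mpr (PySem.Dict.mem_keys_of_mem_items d hp)] at hc
      exact Bool.true_eq_false.mp hc
    have hleft : d.items.filter (fun kv => pvRankOf kv.1 == 3) = d.items := by
      refine List.filter_eq_self.mpr ?_
      intro p hp
      rw [rank_beq3, habs0 p hp, habs1 p hp, habs2 p hp]
      rfl
    simp [PySem.Dict.contains_eq_isSome_get?, PySem.Dict.pop?, e0, e1, e2, pvBuck, hf0, hf1, hf2, hv0, hv1, hv2, hleft]
  · -- case (0, 0, 1)
    have e0 : d.get? "Direct Outreach" = none := by exact hv0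
    have e1 : d.get? "Job Alert Listings" = none := by exact hv1
    have e2 : d.get? "LinkedIn DMs" = some v2 := by exact hv2
    have habs0 : ∀ p ∈ d.items, (p.1 == "Direct Outreach") = false := by
      intro p hp
      have hc := (PySem.Dict.get?_eq_none_iff_contains d "Direct Outreach").mp hv0
      simp only [beq_eq_false_iff_ne, ne_eq]
      intro hpe
      rw [← hpe] at hc
      rw [(PySem.Dict.contains_iff_mem_keys d p.1).mpr (PySem.Dict.mem_keys_of_mem_items d hp)] at hc
      exact Bool.true_eq_false.mp hc
    have habs1 : ∀ p ∈ d.items, (p.1 == "Job Alert Listings") = false := by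
      intro p hp
      have hc := (PySem.Dict.get?_eq_none_iff_contains d "Job Alert Listings").mp hv1
      simp only [beq_eq_false_iff_ne, ne_eq]
      intro hpe
      rw [← hpe] at hc
      rw [(PySem.Dict.contains_iff_mem_keys d p.1).mpr (PySem.Dict.mem_keys_of_mem_items d hp)] at hc
      exact Bool.true_eq_false.mp hc
    have hleft : (d.erase "LinkedIn DMs").items = d.items.filter (fun kv => pvRankOf kv.1 == 3) := by
      simp only [PySem.Dict.erase]
      apply List.filter_congr
      intro p hp
      rw [rank_beq3, habs0 p hp, habs1 p hp]
      cases hx2 : p.1 == "LinkedIn DMs" <;> simp_all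
    simp [PySem.Dict.contains_eq_isSome_get?, PySem.Dict.pop?, e0, e1, e2, pvBuck, hf0, hf1, hf2, hv0, hv1, hv2, hleft]
  · -- case (0, 1, 0)
    have e0 : d.get? "Direct Outreach" = none := by exact hv0
    have e1 : d.get? "Job Alert Listings" = some v1 := by exact hv1
    have e2 : (d.erase "Job Alert Listings").get? "LinkedIn DMs" = none := by rw [get?_erase_ne _ _ _ (by decide)]; exact hv2
    have habs0 : ∀ p ∈ d.items, (p.1 == "Direct Outreach") = false := by
      intro p hp
      have hc := (PySem.Dict.get?_eq_none_iff_contains d "Direct Outreach").mp hv0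
      simp only [beq_eq_false_iff_ne, ne_eq]
      intro hpe
      rw [← hpe] at hc
      rw [(PySem.Dict.contains_iff_mem_keys d p.1).mpr (PySem.Dict.mem_keys_of_mem_items d hp)] at hc
      exact Bool.true_eq_false.mp hc
    have habs2 : ∀ p ∈ d.items, (p.1 == "LinkedIn DMs") = false := by
      intro p hp
      have hc := (PySem.Dict.get?_eq_none_iff_contains d "LinkedIn DMs").mp hv2
      simp only [beq_eq_false_iff_ne, ne_eq]
      intro hpe
      rw [← hpe] at hc
      rw [(PySem.Dict.contains_iff_mem_keys d p.1).mpr (PySem.Dict.mem_keys_of_mem_items d hp)] at hc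
      exact Bool.true_eq_false.mp hc
    have hleft : (d.erase "Job Alert Listings").items = d.items.filter (fun kv => pvRankOf kv.1 == 3) := by
      simp only [PySem.Dict.erase]
      apply List.filter_congr
      intro p hp
      rw [rank_beq3, habs0 p hp, habs2 p hp]
      cases hx1 : p.1 == "Job Alert Listings" <;> simp_all
    simp [PySem.Dict.contains_eq_isSome_get?, PySem.Dict.pop?, e0, e1, e2, pvBuck, hf0, hf1, hf2, hv0, hv1, hv2, hleft]
  · -- case (0, 1, 1)
    have e0 : d.get? "Direct Outreach" = none := by exact hv0
    have e1 : d.get? "Job Alert Listings" = some v1 := by exact hv1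
    have e2 : (d.erase "Job Alert Listings").get? "LinkedIn DMs" = some v2 := by rw [get?_erase_ne _ _ _ (by decide)]; exact hv2
    have habs0 : ∀ p ∈ d.items, (p.1 == "Direct Outreach") = false := by
      intro p hp
      have hc := (PySem.Dict.get?_eq_none_iff_contains d "Direct Outreach").mp hv0
      simp only [beq_eq_false_iff_ne, ne_eq]
      intro hpe
      rw [← hpe] at hc
      rw [(PySem.Dict.contains_iff_mem_keys d p.1).mpr (PySem.Dict.mem_keys_of_mem_items d hp)] at hc
      exact Bool.true_eq_false.mp hc
    have hleft : ((d.erase "Job Alert Listings").erase "LinkedIn DMs").items = d.items.filter (fun kv => pvRankOf kv.1 == 3) := by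
      simp only [PySem.Dict.erase, List.filter_filter]
      apply List.filter_congr
      intro p hp
      rw [rank_beq3, habs0 p hp]
      cases hx1 : p.1 == "Job Alert Listings" <;> cases hx2 : p.1 == "LinkedIn DMs" <;> simp_all
    simp [PySem.Dict.contains_eq_isSome_get?, PySem.Dict.pop?, e0, e1, e2, pvBuck, hf0, hf1, hf2, hv0, hv1, hv2, hleft]
  · -- case (1, 0, 0)
    have e0 : d.get? "Direct Outreach" = some v0 := by exact hv0
    have e1 : (d.erase "Direct Outreach").get? "Job Alert Listings" = none := by rw [get?_erase_ne _ _ _ (by decide)]; exact hv1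
    have e2 : (d.erase "Direct Outreach").get? "LinkedIn DMs" = none := by rw [get?_erase_ne _ _ _ (by decide)]; exact hv2
    have habs1 : ∀ p ∈ d.items, (p.1 == "Job Alert Listings") = false := by
      intro p hp
      have hc := (PySem.Dict.get?_eq_none_iff_contains d "Job Alert Listings").mp hv1
      simp only [beq_eq_false_iff_ne, ne_eq]
      intro hpe
      rw [← hpe] at hc
      rw [(PySem.Dict.contains_iff_mem_keys d p.1).mpr (PySem.Dict.mem_keys_of_mem_items d hp)] at hc
      exact Bool.true_eq_false.mp hc
    have habs2 : ∀ p ∈ d.items, (p.1 == "LinkedIn DMs") = false := by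
      intro p hp
      have hc := (PySem.Dict.get?_eq_none_iff_contains d "LinkedIn DMs").mp hv2
      simp only [beq_eq_false_iff_ne, ne_eq]
      intro hpe
      rw [← hpe] at hc
      rw [(PySem.Dict.contains_iff_mem_keys d p.1).mpr (PySem.Dict.mem_keys_of_mem_items d hp)] at hc
      exact Bool.true_eq_false.mp hc
    have hleft : (d.erase "Direct Outreach").items = d.items.filter (fun kv => pvRankOf kv.1 == 3) := by
      simp only [PySem.Dict.erase]
      apply List.filter_congr
      intro p hp
      rw [rank_beq3, habs1 p hp, habs2 p hp]
      cases hx0 : p.1 == "Direct Outreach" <;> simp_all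
    simp [PySem.Dict.contains_eq_isSome_get?, PySem.Dict.pop?, e0, e1, e2, pvBuck, hf0, hf1, hf2, hv0, hv1, hv2, hleft]
  · -- case (1, 0, 1)
    have e0 : d.get? "Direct Outreach" = some v0 := by exact hv0
    have e1 : (d.erase "Direct Outreach").get? "Job Alert Listings" = none := by rw [get?_erase_ne _ _ _ (by decide)]; exact hv1
    have e2 : (d.erase "Direct Outreach").get? "LinkedIn DMs" = some v2 := by rw [get?_erase_ne _ _ _ (by decide)]; exact hv2
    have habs1 : ∀ p ∈ d.items, (p.1 == "Job Alert Listings") = false := by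
      intro p hp
      have hc := (PySem.Dict.get?_eq_none_iff_contains d "Job Alert Listings").mp hv1
      simp only [beq_eq_false_iff_ne, ne_eq]
      intro hpe
      rw [← hpe] at hc
      rw [(PySem.Dict.contains_iff_mem_keys d p.1).mpr (PySem.Dict.mem_keys_of_mem_items d hp)] at hc
      exact Bool.true_eq_false.mp hc
    have hleft : ((d.erase "Direct Outreach").erase "LinkedIn DMs").items = d.items.filter (fun kv => pvRankOf kv.1 == 3) := by
      simp only [PySem.Dict.erase, List.filter_filter]
      apply List.filter_congr
      intro p hp
      rw [rank_beq3, habs1 p hp]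
      cases hx0 : p.1 == "Direct Outreach" <;> cases hx2 : p.1 == "LinkedIn DMs" <;> simp_all
    simp [PySem.Dict.contains_eq_isSome_get?, PySem.Dict.pop?, e0, e1, e2, pvBuck, hf0, hf1, hf2, hv0, hv1, hv2, hleft]
  · -- case (1, 1, 0)
    have e0 : d.get? "Direct Outreach" = some v0 := by exact hv0
    have e1 : (d.erase "Direct Outreach").get? "Job Alert Listings" = some v1 := by rw [get?_erase_ne _ _ _ (by decide)]; exact hv1
    have e2 : ((d.erase "Direct Outreach").erase "Job Alert Listings").get? "LinkedIn DMs" = none := by rw [get?_erase_ne _ _ _ (by decide), get?_erase_ne _ _ _ (by decide)]; exact hv2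
    have habs2 : ∀ p ∈ d.items, (p.1 == "LinkedIn DMs") = false := by
      intro p hp
      have hc := (PySem.Dict.get?_eq_none_iff_contains d "LinkedIn DMs").mp hv2
      simp only [beq_eq_false_iff_ne, ne_eq]
      intro hpe
      rw [← hpe] at hc
      rw [(PySem.Dict.contains_iff_mem_keys d p.1).mpr (PySem.Dict.mem_keys_of_mem_items d hp)] at hc
      exact Bool.true_eq_false.mp hc
    have hleft : ((d.erase "Direct Outreach").erase "Job Alert Listings").items = d.items.filter (fun kv => pvRankOf kv.1 == 3) := by
      simp only [PySem.Dict.erase, List.filter_filter]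
      apply List.filter_congr
      intro p hp
      rw [rank_beq3, habs2 p hp]
      cases hx0 : p.1 == "Direct Outreach" <;> cases hx1 : p.1 == "Job Alert Listings" <;> simp_all
    simp [PySem.Dict.contains_eq_isSome_get?, PySem.Dict.pop?, e0, e1, e2, pvBuck, hf0, hf1, hf2, hv0, hv1, hv2, hleft]
  · -- case (1, 1, 1)
    have e0 : d.get? "Direct Outreach" = some v0 := by exact hv0
    have e1 : (d.erase "Direct Outreach").get? "Job Alert Listings" = some v1 := by rw [get?_erase_ne _ _ _ (by decide)]; exact hv1
    have e2 : ((d.erase "Direct Outreach").erase "Job Alert Listings").get? "LinkedIn DMs" = some v2 := by rw [get?_erase_ne _ _ _ (by decide), get?_erase_ne _ _ _ (by decide)]; exact hv2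
    have hleft : (((d.erase "Direct Outreach").erase "Job Alert Listings").erase "LinkedIn DMs").items = d.items.filter (fun kv => pvRankOf kv.1 == 3) := by
      simp only [PySem.Dict.erase, List.filter_filter]
      apply List.filter_congr
      intro p hp
      rw [rank_beq3]
      cases hx0 : p.1 == "Direct Outreach" <;> cases hx1 : p.1 == "Job Alert Listings" <;> cases hx2 : p.1 == "LinkedIn DMs" <;> simp_all
    simp [PySem.Dict.contains_eq_isSome_get?, PySem.Dict.pop?, e0, e1, e2, pvBuck, hf0, hf1, hf2, hv0, hv1, hv2, hleft]

-- ===== VERDICT (by name: the statement is the Claim_ definition above) =====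
theorem group_by_source_py_spec : Claim_equal_group_by_source_py := by
  intro items _
  unfold Spec_group_by_source_py group_by_source_py group_by_source_py_alt
  dsimp only
  have hnd : ((items.foldl
      (fun d item => d.modify (pvSrcOf item) [] (fun g => g ++ [item]))
      PySem.Dict.empty).items.map Prod.fst).Nodup :=
    PySem.Dict.nodup_keys_foldl_modify_key items pvSrcOf [] (fun _ item g => g ++ [item])
      PySem.Dict.empty PySem.Dict.nodup_keys_empty
  have hkey : (fun kv : String × List (List (String × String)) =>
      ((PySem.List.enumerate pvSourceOrder).foldl
        (fun d p => d.insert p.2 p.1) (PySem.Dict.empty : PySem.Dict String Int)).getD kv.1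
          (PySem.List.len pvSourceOrder)) = fun kv => pvRankOf kv.1 :=
    funext (fun kv => pvRank_eval kv.1)
  rw [hkey, sorted_eq_buckets]
  exact emit_eq _ hnd
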